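-- pv_equiv track=rewrite | github.com/karetz/Python_work | HW9.py | sameVowels
-- ===== SOURCE A (Python) =====
-- def sameVowels(str1, str2):
--     """
--     checking if the vowles in str1 is equal to the vowles in str2
--     :param str1: string
--     :param str2: string
--     :return: true or false
--     """
--     vowels = {'a', 'e', 'o', 'u', 'i'}
--     # creating a dictionary per each strings vowels
--     dictionary_vow_1 = {}
--     dictionary_vow_2 = {}
--
--     # looping on letters on str1- if they are vowels add to dictionary_vow_1 when key is letter and value is 1
--     # if they are already in dictionary_vow_1, defined the new value as value+1
--     for letter in str1:
--         if letter in vowels: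
--             if letter in dictionary_vow_1:
--                 dictionary_vow_1[letter] = dictionary_vow_1[letter] + 1
--             else:
--                 dictionary_vow_1[letter] = 1
--         else:
--             continue
--
--     # looping on letters on str2- if they are vowels add to dictionary_vow_2 when key is letter and value is 1
--     # if they are already in dictionary_vow_2, defined the new value as value+1
--     for letter in str2:
--         if letter in vowels:
--             if letter in dictionary_vow_2:
--                 dictionary_vow_2[letter] = dictionary_vow_2[letter] + 1
--             else:
--                 dictionary_vow_2[letter] = 1
--         else:
--             continue
--     # checking if both dictionarys are equal- if there is return True, else- False
--     return True if dictionary_vow_1 == dictionary_vow_2 else False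
-- ===== SOURCE B (Python) =====
-- def sameVowels(str1, str2):
--     """Same result as A: True iff the two strings contain the same vowels with the
--     same multiplicities. Tests multiset equality by sorting the extracted vowels
--     instead of building per-string frequency dictionaries."""
--     vowels = {'a', 'e', 'o', 'u', 'i'}
--     v1 = sorted([c for c in str1 if c in vowels])
--     v2 = sorted([c for c in str2 if c in vowels])
--     return v1 == v2
-- ===== Notes on version B (the rewrite author's own statement) =====
-- stated objective: simpler
-- what changed: Replaces the two frequency-dictionary building loops and the dict comparison by extracting each string's vowels with a filter, sorting both lists, and comparing the sorted lists (multiset equality by ordering).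
import Mathlib
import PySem

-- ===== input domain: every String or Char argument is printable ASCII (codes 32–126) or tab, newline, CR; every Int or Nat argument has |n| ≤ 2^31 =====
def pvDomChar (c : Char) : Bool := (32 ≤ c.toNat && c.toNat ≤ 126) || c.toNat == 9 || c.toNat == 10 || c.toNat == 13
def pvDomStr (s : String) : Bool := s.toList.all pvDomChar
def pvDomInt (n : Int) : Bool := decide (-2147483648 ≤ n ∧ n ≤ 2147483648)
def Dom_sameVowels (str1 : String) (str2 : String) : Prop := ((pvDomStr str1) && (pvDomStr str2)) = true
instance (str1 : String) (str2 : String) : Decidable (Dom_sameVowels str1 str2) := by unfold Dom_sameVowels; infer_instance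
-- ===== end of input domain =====

-- B replaces A's two frequency-dictionary loops by filter-then-sort on each string and
-- compares the sorted vowel lists (simpler; same return value).

-- ===== PORT A =====
-- vowels = {'a', 'e', 'o', 'u', 'i'}
def pvVowelsA : PySem.Set Char := PySem.Set.ofList ['a', 'e', 'o', 'u', 'i']

-- the counting loop A runs over each string (letter in vowels → bump/insert, else continue)
def pvCountLoopA (cs : List Char) : PySem.Dict Char Int :=
  cs.foldl (fun d letter =>
    if PySem.Set.contains pvVowelsA letter then
      if d.contains letter then d.insert letter (d.getD letter 0 + 1)
      else d.insert letter 1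
    else d) PySem.Dict.empty

-- Python's dict == (order-insensitive): same key set and same value at every key
def pvDictEqA (d1 d2 : PySem.Dict Char Int) : Bool :=
  PySem.Set.equal d1.keys d2.keys && d1.keys.all (fun k => d1.getD k 0 == d2.getD k 0)

def sameVowels (str1 : String) (str2 : String) : Bool :=
  let dictionary_vow_1 := pvCountLoopA str1.toList
  let dictionary_vow_2 := pvCountLoopA str2.toList
  if pvDictEqA dictionary_vow_1 dictionary_vow_2 then true else false

-- ===== PORT B =====
def pvVowelsB : PySem.Set Char := PySem.Set.ofList ['a', 'e', 'o', 'u', 'i']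

-- sorted([c for c in s if c in vowels])
def pvSortedVowelsB (s : String) : List Char :=
  PySem.List.sorted (s.toList.filter (fun c => PySem.Set.contains pvVowelsB c)) (fun x => x) false

def sameVowels_alt (str1 : String) (str2 : String) : Bool :=
  decide (pvSortedVowelsB str1 = pvSortedVowelsB str2)

-- ===== PRECONDITION & SPEC =====
def Spec_sameVowels (str1 : String) (str2 : String) (out : Bool) : Prop := out = sameVowels_alt str1 str2
instance (str1 : String) (str2 : String) (out : Bool) : Decidable (Spec_sameVowels str1 str2 out) := by unfold Spec_sameVowels; infer_instance

-- ===== CLAIM (what is proved, stated in full; the proofs are below) =====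
def Claim_equal_sameVowels : Prop := ∀ (str1 : String) (str2 : String), Dom_sameVowels str1 str2 → Spec_sameVowels str1 str2 (sameVowels str1 str2)

-- ===== LEMMAS AND PROOFS =====

-- A's loop is Counter of the vowel sublist
lemma pvCountLoopA_eq_counter (cs : List Char) :
    pvCountLoopA cs =
      PySem.Dict.counter (cs.filter (fun c => PySem.Set.contains pvVowelsA c)) := by
  unfold pvCountLoopA
  rw [← PySem.Dict.foldl_insert_getD_add_one_eq_counter, ← List.foldl_filter]
  congr 1
  funext d letter
  split_ifs with hv
  · rfl
  · have hcf : d.contains letter = false := by simp_all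
    rw [PySem.Dict.getD_of_not_contains d 0 hcf]
    norm_num

lemma pvDictEqA_counter_iff (xs ys : List Char) :
    pvDictEqA (PySem.Dict.counter xs) (PySem.Dict.counter ys) = true ↔ xs.Perm ys := by
  unfold pvDictEqA
  rw [Bool.and_eq_true, PySem.Set.equal_iff]
  simp only [PySem.Dict.keys_counter, List.all_eq_true, PySem.Set.mem_ofList,
    PySem.Dict.getD_counter, beq_iff_eq]
  constructor
  · rintro ⟨hmem, hcnt⟩
    rw [List.perm_iff_count]
    intro v
    by_cases hv : v ∈ xs
    · exact_mod_cast hcnt v hv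
    · have hv' : v ∉ ys := fun h => hv ((hmem v).mpr h)
      simp [List.count_eq_zero_of_not_mem hv, List.count_eq_zero_of_not_mem hv']
  · intro hp
    refine ⟨fun v => ⟨fun h => hp.mem_iff.mp h, fun h => hp.mem_iff.mpr h⟩, ?_⟩
    intro v _
    exact_mod_cast hp.count_eq v

-- B compares sorted lists: true iff the vowel sublists are permutations
lemma pvSortedVowelsB_eq_iff (s1 s2 : String) :
    pvSortedVowelsB s1 = pvSortedVowelsB s2 ↔
      (s1.toList.filter (fun c => PySem.Set.contains pvVowelsB c)).Perm
        (s2.toList.filter (fun c => PySem.Set.contains pvVowelsB c)) := by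
  unfold pvSortedVowelsB
  exact PySem.List.sorted_id_eq_sorted_id_iff_perm _ _

-- ===== VERDICT (by name: the statement is the Claim_ definition above) =====
theorem sameVowels_spec : Claim_equal_sameVowels := by
  intro str1 str2 _
  unfold Spec_sameVowels sameVowels sameVowels_alt
  rw [pvCountLoopA_eq_counter, pvCountLoopA_eq_counter,
      show pvVowelsA = pvVowelsB from rfl]
  dsimp only
  by_cases h : pvSortedVowelsB str1 = pvSortedVowelsB str2
  · have ht := (pvDictEqA_counter_iff _ _).mpr ((pvSortedVowelsB_eq_iff _ _).mp h)
    rw [ht, if_pos rfl, decide_eq_true h]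
  · have hf : pvDictEqA
        (PySem.Dict.counter (str1.toList.filter (fun c => PySem.Set.contains pvVowelsB c)))
        (PySem.Dict.counter (str2.toList.filter (fun c => PySem.Set.contains pvVowelsB c))) = false := by
      rw [Bool.eq_false_iff]
      intro hc
      exact h ((pvSortedVowelsB_eq_iff _ _).mpr ((pvDictEqA_counter_iff _ _).mp hc))
    rw [hf, decide_eq_false h]
    simp
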